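-- pv_equiv track=rewrite | github.com/EmilMachine/adventofcode2024 | dec16_graph.py | recount_path
-- ===== SOURCE A (Python) =====
-- def recount_path(path: list[tuple[int]]) -> int:
--     dir = (0, 1)  # start east
--     pos = path[0]
--     cost = 0
--     for p in path[1:]:
--         new_dir = (p[0] - pos[0], p[1] - pos[1])
--         if dir != new_dir:
--             cost += 1001
--         else:
--             cost += 1
--         dir = new_dir
--         pos = p
--     return cost
-- ===== SOURCE B (Python) =====
-- def recount_path(path: list[tuple[int]]) -> int:
--     # Geometric reformulation: a turn at an interior point b between a and c
--     # happens exactly when b is not the midpoint of a and c (2*b != a + c);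
--     # an initial turn happens when the first step is not eastward (0, 1).
--     first = path[0]
--     if len(path) == 1:
--         return 0
--     turns = (path[1][0] - first[0], path[1][1] - first[1]) != (0, 1)
--     for a, b, c in zip(path, path[1:], path[2:]):
--         turns += (2 * b[0], 2 * b[1]) != (a[0] + c[0], a[1] + c[1])
--     return (len(path) - 1) + 1000 * turns
-- ===== Notes on version B (the rewrite author's own statement) =====
-- stated objective: alternative
-- what changed: Replaces A's direction-state loop (carrying dir/pos and adding 1 or 1001 per step) with a geometric corner count: an interior point is a turn iff it is not the midpoint of its neighbours (2*b != a+c), plus an initial non-east first step, combined by the closed form (len-1)+1000*turns.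
import Mathlib
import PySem

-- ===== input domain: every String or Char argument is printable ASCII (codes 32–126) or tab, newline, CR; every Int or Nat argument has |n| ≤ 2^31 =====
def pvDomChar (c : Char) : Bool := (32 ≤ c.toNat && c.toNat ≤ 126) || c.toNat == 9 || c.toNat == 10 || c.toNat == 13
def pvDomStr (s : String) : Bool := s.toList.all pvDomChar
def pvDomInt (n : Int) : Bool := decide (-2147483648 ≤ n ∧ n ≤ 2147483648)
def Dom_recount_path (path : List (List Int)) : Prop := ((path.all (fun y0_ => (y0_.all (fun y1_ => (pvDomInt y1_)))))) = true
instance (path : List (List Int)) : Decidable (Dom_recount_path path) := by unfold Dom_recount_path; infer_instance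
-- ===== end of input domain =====

-- B drops A's direction-state loop: it counts turns geometrically, as interior points
-- that are not the midpoint of their neighbours (2*b ≠ a + c), plus an initial
-- non-east first step, and returns the closed form (len-1) + 1000*turns.

-- ===== PORT A =====
-- pyGetD with default 0 is exact here: Pre_ guarantees every accessed index is in range.
-- one iteration of A's for-loop over state (dir, pos, cost)
def stepFoldA (st : (Int × Int) × (List Int × Int)) (p : List Int) :
    (Int × Int) × (List Int × Int) :=
  let nd : Int × Int :=
    (PySem.List.pyGetD p 0 0 - PySem.List.pyGetD st.2.1 0 0,
     PySem.List.pyGetD p 1 0 - PySem.List.pyGetD st.2.1 1 0)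
  (nd, p, st.2.2 + if st.1 ≠ nd then 1001 else 1)

def recount_path (path : List (List Int)) : Int :=
  match path with
  | [] => 0  -- Python raises IndexError on path[0]; excluded by Pre_
  | pos0 :: rest =>
    (rest.foldl stepFoldA (((0 : Int), (1 : Int)), pos0, (0 : Int))).2.2

-- ===== PORT B =====
-- Source B's midpoint test on a point triple (2*b[0], 2*b[1]) != (a[0]+c[0], a[1]+c[1])
def midTurn (a b c : List Int) : Bool :=
  decide ((2 * PySem.List.pyGetD b 0 0, 2 * PySem.List.pyGetD b 1 0)
          ≠ (PySem.List.pyGetD a 0 0 + PySem.List.pyGetD c 0 0,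
             PySem.List.pyGetD a 1 0 + PySem.List.pyGetD c 1 0))

def recount_path_alt (path : List (List Int)) : Int :=
  match path with
  | [] => 0  -- Python raises IndexError on path[0]; excluded by Pre_
  | first :: rest =>
    match rest with
    | [] => 0  -- len(path) == 1
    | p1 :: _ =>
      -- initial turn: first step not eastward
      let turns0 : Int :=
        if (PySem.List.pyGetD p1 0 0 - PySem.List.pyGetD first 0 0,
            PySem.List.pyGetD p1 1 0 - PySem.List.pyGetD first 1 0) ≠ ((0 : Int), (1 : Int))
        then 1 else 0
      -- for a, b, c in zip(path, path[1:], path[2:]): turns += midpoint test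
      let turns : Int :=
        ((path.zip (path.tail.zip path.tail.tail)).foldl
          (fun t abc => t + if midTurn abc.1 abc.2.1 abc.2.2 then 1 else 0) turns0)
      ((path.length : Int) - 1) + 1000 * turns

-- ===== PRECONDITION & SPEC =====
-- Pre_ excludes exactly the inputs where Python A raises IndexError: the empty path
-- (path[0]) and paths of length ≥ 2 containing a point with fewer than 2 coordinates.
def Pre_recount_path (path : List (List Int)) : Prop :=
  path ≠ [] ∧ (2 ≤ path.length → ∀ l ∈ path, 2 ≤ l.length)
instance (path : List (List Int)) : Decidable (Pre_recount_path path) := by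
  unfold Pre_recount_path; infer_instance
def pvWitness_recount_path : List (List Int) := [[0, 0], [0, 1], [1, 1]]

def Spec_recount_path (path : List (List Int)) (out : Int) : Prop := out = recount_path_alt path
instance (path : List (List Int)) (out : Int) : Decidable (Spec_recount_path path out) := by
  unfold Spec_recount_path; infer_instance

-- ===== CLAIM (what is proved, stated in full; the proofs are below) =====
def Claim_equal_recount_path : Prop :=
  ∀ (path : List (List Int)), Dom_recount_path path → Pre_recount_path path →
    Spec_recount_path path (recount_path path)

-- ===== LEMMAS AND PROOFS =====

-- the step direction A computes between consecutive points
def stepDir (p q : List Int) : Int × Int :=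
  (PySem.List.pyGetD q 0 0 - PySem.List.pyGetD p 0 0,
   PySem.List.pyGetD q 1 0 - PySem.List.pyGetD p 1 0)

-- A's turn count, recursively over the remaining points with carried (dir, pos)
def turnsA (dir : Int × Int) (pos : List Int) : List (List Int) → Nat
  | [] => 0
  | p :: rest => (if dir ≠ stepDir pos p then 1 else 0) + turnsA (stepDir pos p) p rest

-- B's interior-corner count over consecutive triples, structurally
def corners (a b : List Int) : List (List Int) → Nat
  | [] => 0
  | c :: rest => (if midTurn a b c then 1 else 0) + corners b c rest

theorem midTurn_iff (a b c : List Int) :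
    midTurn a b c = true ↔ stepDir a b ≠ stepDir b c := by
  simp [midTurn, stepDir, Prod.ext_iff]
  omega

theorem turnsA_eq_corners (pos p : List Int) (rest : List (List Int)) :
    turnsA (stepDir pos p) p rest = corners pos p rest := by
  induction rest generalizing pos p with
  | nil => rfl
  | cons c rest ih =>
    simp only [turnsA, corners, ih]
    by_cases h : stepDir pos p ≠ stepDir p c
    · rw [if_pos h, if_pos ((midTurn_iff pos p c).2 h)]
    · rw [if_neg h, if_neg (fun hb => h ((midTurn_iff pos p c).1 hb))]

theorem loopA (rest : List (List Int)) (dir : Int × Int) (pos : List Int) (cost : Int) :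
    ((rest.foldl stepFoldA (dir, pos, cost)).2.2 : Int)
    = cost + rest.length + 1000 * (turnsA dir pos rest : Int) := by
  induction rest generalizing dir pos cost with
  | nil => simp [turnsA]
  | cons p rest ih =>
    rw [List.foldl_cons]
    have hs : stepFoldA (dir, pos, cost) p
        = (stepDir pos p, p, cost + if dir ≠ stepDir pos p then 1001 else 1) := rfl
    rw [hs, ih]
    simp only [turnsA]
    push_cast
    split_ifs with h <;> simp [List.length_cons] <;> ring

-- B's foldl over the zipped triples computes corners
theorem loopB (rest : List (List Int)) (a b : List Int) (t0 : Int) :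
    ((a :: b :: rest).zip ((b :: rest).zip rest)).foldl
      (fun t abc => t + if midTurn abc.1 abc.2.1 abc.2.2 then 1 else 0) t0
    = t0 + (corners a b rest : Int) := by
  induction rest generalizing a b t0 with
  | nil => simp [corners]
  | cons c rest ih =>
    simp only [List.zip_cons_cons, List.foldl_cons]
    rw [ih]
    simp only [corners]
    push_cast
    ring

-- ===== VERDICT (by name: the statement is the Claim_ definition above) =====
theorem recount_path_spec : Claim_equal_recount_path := by
  intro path _ hpre
  unfold Spec_recount_path
  obtain ⟨hne, -⟩ := hpre
  match path with
  | [] => exact absurd rfl hne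
  | [pos0] => rfl
  | pos0 :: p1 :: rest =>
    have hA : recount_path (pos0 :: p1 :: rest)
        = ((p1 :: rest).foldl stepFoldA (((0 : Int), (1 : Int)), pos0, (0 : Int))).2.2 := rfl
    rw [hA, loopA]
    show (0 : Int) + _ + _ = recount_path_alt (pos0 :: p1 :: rest)
    have hB : recount_path_alt (pos0 :: p1 :: rest)
        = (((pos0 :: p1 :: rest).length : Int) - 1)
          + 1000 * (((pos0 :: p1 :: rest).zip
              ((p1 :: rest).zip rest)).foldl
            (fun t abc => t + if midTurn abc.1 abc.2.1 abc.2.2 then 1 else 0)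
            (if stepDir pos0 p1 ≠ ((0 : Int), (1 : Int)) then 1 else 0)) := rfl
    rw [hB, loopB]
    simp only [turnsA, turnsA_eq_corners]
    push_cast
    by_cases h : stepDir pos0 p1 = ((0:Int),(1:Int)) <;>
      simp [h, Ne.symm, List.length_cons]
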